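-- pv_equiv track=rewrite | github.com/CrocodileWoodGordon/Mindscape_Ark | src/core/game.py | _pick_spawn_cell
-- ===== SOURCE A (Python) =====
-- def _pick_spawn_cell(
--
--     desired_cell: tuple[int, int],
--     accessible_cells: list[tuple[int, int]],
--     taken_cells: set[tuple[int, int]],
--     max_distance: int,
-- ) -> tuple[int, int] | None:
--     best_cell: tuple[int, int] | None = None
--     best_score = 1_000_000
--     for cell in accessible_cells:
--         if cell in taken_cells:
--             continue
--         dist = abs(cell[0] - desired_cell[0]) + abs(cell[1] - desired_cell[1])
--         if dist > max_distance:
--             continue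
--         if dist < best_score:
--             best_cell = cell
--             best_score = dist
--             if dist == 0:
--                 break
--     return best_cell
-- ===== SOURCE B (Python) =====
-- def _pick_spawn_cell(
--     desired_cell,
--     accessible_cells,
--     taken_cells,
--     max_distance,
-- ):
--     scored = [
--         (abs(c[0] - desired_cell[0]) + abs(c[1] - desired_cell[1]), c)
--         for c in accessible_cells
--     ]
--     scored.sort(key=lambda t: t[0])  # stable: ties keep input order
--     for dist, cell in scored:
--         if dist > max_distance:
--             return None  # ascending distances: nothing closer remains
--         if cell not in taken_cells:
--             return cell
--     return None
-- ===== Notes on version B (the rewrite author's own statement) =====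
-- stated objective: alternative
-- what changed: B replaces A's running-best accumulator loop with score/sort/scan: it computes every cell's Manhattan distance, stably sorts by distance only, and returns the first untaken cell in that order, cutting off as soon as distances exceed max_distance; B also drops A's best_score=1_000_000 sentinel cap (see differs).
-- intended difference: On inputs where some accessible cell is untaken and within max_distance but every such cell is at Manhattan distance >= 1_000_000, A returns None (its best_score sentinel 1_000_000 silently caps the search) while B returns the nearest such cell, which is the intended 'nearest accessible cell within max_distance'. — e.g. on _pick_spawn_cell((0, 0), [(1000000, 0)], [], 1000000): A returns none, B returns some (1000000, 0)
import Mathlib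
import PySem

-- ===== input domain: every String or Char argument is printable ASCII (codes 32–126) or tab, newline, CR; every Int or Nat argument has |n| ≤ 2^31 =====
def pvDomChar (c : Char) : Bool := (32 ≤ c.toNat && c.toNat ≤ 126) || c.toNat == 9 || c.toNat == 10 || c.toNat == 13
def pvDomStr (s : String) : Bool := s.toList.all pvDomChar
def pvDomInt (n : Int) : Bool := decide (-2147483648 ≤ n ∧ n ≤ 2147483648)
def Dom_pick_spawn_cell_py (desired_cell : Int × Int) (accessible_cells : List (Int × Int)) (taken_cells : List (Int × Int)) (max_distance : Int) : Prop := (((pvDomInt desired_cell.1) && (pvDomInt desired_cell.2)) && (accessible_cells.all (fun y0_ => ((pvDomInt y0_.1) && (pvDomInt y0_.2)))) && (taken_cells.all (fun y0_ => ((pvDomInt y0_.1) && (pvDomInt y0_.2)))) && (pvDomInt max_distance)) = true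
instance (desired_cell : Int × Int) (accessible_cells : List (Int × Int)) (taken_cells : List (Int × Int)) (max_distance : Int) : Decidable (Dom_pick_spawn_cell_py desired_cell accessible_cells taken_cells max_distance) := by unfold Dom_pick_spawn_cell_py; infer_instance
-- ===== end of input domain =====

-- B replaces A's running-best accumulator loop by score / stable-sort-by-distance / scan-for-first-
-- untaken (alternative decomposition, same result), and drops A's best_score = 1_000_000 sentinel
-- cap (intended difference D_ below).

-- ===== PORT A =====
-- A's for-loop with its (best_cell, best_score) state; 'break' at dist == 0 returns directly
def pickLoopA (desired : Int × Int) (taken : List (Int × Int)) (maxd : Int) :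
    List (Int × Int) → Option (Int × Int) → Int → Option (Int × Int)
  | [], best, _ => best
  | c :: rest, best, score =>
    if c ∈ taken then pickLoopA desired taken maxd rest best score
    else
      let dist := |c.1 - desired.1| + |c.2 - desired.2|
      if dist > maxd then pickLoopA desired taken maxd rest best score
      else if dist < score then
        (if dist = 0 then some c else pickLoopA desired taken maxd rest (some c) dist)
      else pickLoopA desired taken maxd rest best score

def pick_spawn_cell_py (desired_cell : Int × Int) (accessible_cells : List (Int × Int)) (taken_cells : List (Int × Int)) (max_distance : Int) : Option (Int × Int) :=
  pickLoopA desired_cell taken_cells max_distance accessible_cells none 1000000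

-- ===== PORT B =====
-- Source B's scan over the distance-sorted list: first untaken cell, early None past max_distance
def pickScanB (taken : List (Int × Int)) (maxd : Int) :
    List (Int × (Int × Int)) → Option (Int × Int)
  | [] => none
  | (dist, cell) :: rest =>
    if dist > maxd then none
    else if cell ∉ taken then some cell
    else pickScanB taken maxd rest

def pick_spawn_cell_py_alt (desired_cell : Int × Int) (accessible_cells : List (Int × Int)) (taken_cells : List (Int × Int)) (max_distance : Int) : Option (Int × Int) :=
  let scored := accessible_cells.map (fun c => (|c.1 - desired_cell.1| + |c.2 - desired_cell.2|, c))
  pickScanB taken_cells max_distance (PySem.List.sorted scored (fun t => t.1))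

-- ===== PRECONDITION & SPEC =====
-- On inputs where some accessible cell is untaken and within max_distance but every such cell is at
-- Manhattan distance ≥ 1_000_000, A returns none (its best_score sentinel 1_000_000 silently caps
-- the search) while B returns the nearest such cell, which is the intended
-- "nearest accessible untaken cell within max_distance".
def D_pick_spawn_cell_py (desired_cell : Int × Int) (accessible_cells : List (Int × Int)) (taken_cells : List (Int × Int)) (max_distance : Int) : Prop :=
  (∃ c ∈ accessible_cells, c ∉ taken_cells ∧
    ((c.1 - desired_cell.1).natAbs : Int) + ((c.2 - desired_cell.2).natAbs : Int) ≤ max_distance) ∧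
  (∀ c ∈ accessible_cells, c ∉ taken_cells →
    ((c.1 - desired_cell.1).natAbs : Int) + ((c.2 - desired_cell.2).natAbs : Int) ≤ max_distance →
    1000000 ≤ ((c.1 - desired_cell.1).natAbs : Int) + ((c.2 - desired_cell.2).natAbs : Int))
instance (desired_cell : Int × Int) (accessible_cells : List (Int × Int)) (taken_cells : List (Int × Int)) (max_distance : Int) : Decidable (D_pick_spawn_cell_py desired_cell accessible_cells taken_cells max_distance) := by unfold D_pick_spawn_cell_py; infer_instance

def Spec_pick_spawn_cell_py (desired_cell : Int × Int) (accessible_cells : List (Int × Int)) (taken_cells : List (Int × Int)) (max_distance : Int) (out : Option (Int × Int)) : Prop := ¬ D_pick_spawn_cell_py desired_cell accessible_cells taken_cells max_distance → out = pick_spawn_cell_py_alt desired_cell accessible_cells taken_cells max_distance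
instance (desired_cell : Int × Int) (accessible_cells : List (Int × Int)) (taken_cells : List (Int × Int)) (max_distance : Int) (out : Option (Int × Int)) : Decidable (Spec_pick_spawn_cell_py desired_cell accessible_cells taken_cells max_distance out) := by unfold Spec_pick_spawn_cell_py; infer_instance

def pvDiffWitness_pick_spawn_cell_py : (Int × Int) × (List (Int × Int)) × (List (Int × Int)) × Int :=
  ((0, 0), [(1000000, 0)], [], 1000000)
def pvDiffWitnessOut_pick_spawn_cell_py : (Option (Int × Int)) × (Option (Int × Int)) :=
  (none, some (1000000, 0))

-- ===== CLAIM (what is proved, stated in full; the proofs are below) =====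
def Claim_unchanged_pick_spawn_cell_py : Prop := ∀ (desired_cell : Int × Int) (accessible_cells : List (Int × Int)) (taken_cells : List (Int × Int)) (max_distance : Int), Dom_pick_spawn_cell_py desired_cell accessible_cells taken_cells max_distance → Spec_pick_spawn_cell_py desired_cell accessible_cells taken_cells max_distance (pick_spawn_cell_py desired_cell accessible_cells taken_cells max_distance)
def Claim_changed_pick_spawn_cell_py : Prop := Dom_pick_spawn_cell_py (pvDiffWitness_pick_spawn_cell_py.1) (pvDiffWitness_pick_spawn_cell_py.2.1) (pvDiffWitness_pick_spawn_cell_py.2.2.1) (pvDiffWitness_pick_spawn_cell_py.2.2.2) ∧ D_pick_spawn_cell_py (pvDiffWitness_pick_spawn_cell_py.1) (pvDiffWitness_pick_spawn_cell_py.2.1) (pvDiffWitness_pick_spawn_cell_py.2.2.1) (pvDiffWitness_pick_spawn_cell_py.2.2.2) ∧ pick_spawn_cell_py (pvDiffWitness_pick_spawn_cell_py.1) (pvDiffWitness_pick_spawn_cell_py.2.1) (pvDiffWitness_pick_spawn_cell_py.2.2.1) (pvDiffWitness_pick_spawn_cell_py.2.2.2) = pvDiffWitnessOut_pick_spawn_cell_py.1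 ∧ pick_spawn_cell_py_alt (pvDiffWitness_pick_spawn_cell_py.1) (pvDiffWitness_pick_spawn_cell_py.2.1) (pvDiffWitness_pick_spawn_cell_py.2.2.1) (pvDiffWitness_pick_spawn_cell_py.2.2.2) = pvDiffWitnessOut_pick_spawn_cell_py.2 ∧ pvDiffWitnessOut_pick_spawn_cell_py.1 ≠ pvDiffWitnessOut_pick_spawn_cell_py.2
def Claim_exact_pick_spawn_cell_py : Prop := ∀ (desired_cell : Int × Int) (accessible_cells : List (Int × Int)) (taken_cells : List (Int × Int)) (max_distance : Int), Dom_pick_spawn_cell_py desired_cell accessible_cells taken_cells max_distance → D_pick_spawn_cell_py desired_cell accessible_cells taken_cells max_distance → pick_spawn_cell_py desired_cell accessible_cells taken_cells max_distance ≠ pick_spawn_cell_py_alt desired_cell accessible_cells taken_cells max_distance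

-- ===== LEMMAS AND PROOFS =====

def pvDist (d c : Int × Int) : Int := |c.1 - d.1| + |c.2 - d.2|

theorem pvDist_eq (d c : Int × Int) :
    ((c.1 - d.1).natAbs : Int) + ((c.2 - d.2).natAbs : Int) = pvDist d c := by
  unfold pvDist
  rw [Int.abs_eq_natAbs, Int.abs_eq_natAbs]

-- the common reference value: FIRST accessible cell achieving the minimal distance among the
-- untaken cells within max_distance (no 1_000_000 cap)
def pvQ (d : Int × Int) (taken : List (Int × Int)) (maxd : Int) (c : Int × Int) : Bool :=
  decide (pvDist d c ≤ maxd) && decide (c ∉ taken)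
def pvFm (d : Int × Int) (taken : List (Int × Int)) (maxd : Int) : List (Int × Int) → Option (Int × Int)
  | [] => none
  | c :: rest =>
    if pvQ d taken maxd c then
      some ((pvFm d taken maxd rest).elim c (fun m => if pvDist d m < pvDist d c then m else c))
    else pvFm d taken maxd rest

theorem pvDist_nonneg (d c : Int × Int) : 0 ≤ pvDist d c := by unfold pvDist; positivity


theorem pickLoopA_cons (d : Int × Int) (taken : List (Int × Int)) (maxd : Int)
    (c : Int × Int) (rest : List (Int × Int)) (best : Option (Int × Int)) (score : Int) :
    pickLoopA d taken maxd (c :: rest) best score =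
      if pvQ d taken maxd c then
        (if pvDist d c < score then
          (if pvDist d c = 0 then some c else pickLoopA d taken maxd rest (some c) (pvDist d c))
         else pickLoopA d taken maxd rest best score)
      else pickLoopA d taken maxd rest best score := by
  have hdist : |c.1 - d.1| + |c.2 - d.2| = pvDist d c := rfl
  simp only [pickLoopA]
  rw [hdist]
  by_cases hmem : c ∈ taken
  · have hqf : ¬ (pvQ d taken maxd c = true) := by simp [pvQ, hmem]
    rw [if_pos hmem, if_neg hqf]
  · rw [if_neg hmem]
    by_cases hgt : pvDist d c > maxd
    · have hqf : ¬ (pvQ d taken maxd c = true) := by simp [pvQ, hmem]; omega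
      rw [if_pos hgt, if_neg hqf]
    · have hqt : pvQ d taken maxd c = true := by simp [pvQ, hmem]; omega
      rw [if_neg hgt, if_pos hqt]

theorem pvFm_cons (d : Int × Int) (taken : List (Int × Int)) (maxd : Int)
    (c : Int × Int) (rest : List (Int × Int)) :
    pvFm d taken maxd (c :: rest) =
      if pvQ d taken maxd c then
        some ((pvFm d taken maxd rest).elim c (fun m => if pvDist d m < pvDist d c then m else c))
      else pvFm d taken maxd rest := rfl

theorem pickLoopA_eq (d : Int × Int) (taken : List (Int × Int)) (maxd : Int) :
    ∀ (cs : List (Int × Int)) (best : Option (Int × Int)) (score : Int),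
      pickLoopA d taken maxd cs best score =
        (pvFm d taken maxd cs).elim best (fun m => if pvDist d m < score then some m else best) := by
  intro cs
  induction cs with
  | nil => intro best score; rfl
  | cons c rest ih =>
    intro best score
    rw [pickLoopA_cons, pvFm_cons]
    by_cases hq : pvQ d taken maxd c = true
    · rw [if_pos hq, if_pos hq, Option.elim_some]
      rcases hfm : pvFm d taken maxd rest with _ | m
      · simp only [Option.elim_none]
        by_cases hs : pvDist d c < score
        · rw [if_pos hs, if_pos hs]
          by_cases h0 : pvDist d c = 0
          · rw [if_pos h0]
          · rw [if_neg h0, ih, hfm, Option.elim_none]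
        · rw [if_neg hs, if_neg hs, ih, hfm, Option.elim_none]
      · simp only [Option.elim_some]
        have hm0 := pvDist_nonneg d m
        by_cases hm : pvDist d m < pvDist d c
        · rw [if_pos hm]
          by_cases hs : pvDist d c < score
          · rw [if_pos hs, if_pos (show pvDist d m < score by omega)]
            by_cases h0 : pvDist d c = 0
            · exact absurd hm (by omega)
            · rw [if_neg h0, ih, hfm, Option.elim_some, if_pos hm]
          · rw [if_neg hs, ih, hfm, Option.elim_some]
        · rw [if_neg hm]
          by_cases hs : pvDist d c < score
          · rw [if_pos hs, if_pos hs]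
            by_cases h0 : pvDist d c = 0
            · rw [if_pos h0]
            · rw [if_neg h0, ih, hfm, Option.elim_some, if_neg hm]
          · rw [if_neg hs, if_neg hs, ih, hfm, Option.elim_some,
              if_neg (show ¬ pvDist d m < score by omega)]
    · rw [if_neg hq, if_neg hq, ih]

def pvBef (a b : Int × (Int × Int)) : Bool := decide (a.1 < b.1)
def pvPP (taken : List (Int × Int)) (maxd : Int) (t : Int × (Int × Int)) : Bool :=
  decide (t.1 ≤ maxd) && decide (t.2 ∉ taken)
def pvStep (h : Option (Int × (Int × Int))) (x : Int × (Int × Int)) : Option (Int × (Int × Int)) :=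
  some (h.elim x (fun y => if pvBef x y then x else y))

theorem insertBy_cons {α : Type} (bef : α → α → Bool) (x y : α) (ys : List α) :
    PySem.List.insertBy bef x (y :: ys) =
      if bef x y then x :: y :: ys else y :: PySem.List.insertBy bef x ys := rfl

theorem head?_insertBy (x : Int × (Int × Int)) (acc : List (Int × (Int × Int))) :
    (PySem.List.insertBy pvBef x acc).head? = pvStep acc.head? x := by
  cases acc with
  | nil => rfl
  | cons y ys =>
    rw [insertBy_cons]
    by_cases h : pvBef x y = true
    · rw [if_pos h]; simp [pvStep, h]
    · rw [if_neg h]; simp [pvStep, Bool.eq_false_iff.mpr h]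

theorem head?_foldl_insertBy :
    ∀ (xs : List (Int × (Int × Int))) (acc : List (Int × (Int × Int))),
      (xs.foldl (fun a x => PySem.List.insertBy pvBef x a) acc).head? = xs.foldl pvStep acc.head? := by
  intro xs
  induction xs with
  | nil => intro acc; rfl
  | cons x xs ih =>
    intro acc
    rw [List.foldl_cons, List.foldl_cons, ih, head?_insertBy]

theorem pairwise_insertBy (x : Int × (Int × Int)) :
    ∀ (acc : List (Int × (Int × Int))), acc.Pairwise (fun a b => a.1 ≤ b.1) →
      (PySem.List.insertBy pvBef x acc).Pairwise (fun a b => a.1 ≤ b.1) := by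
  intro acc
  induction acc with
  | nil => intro _; simp [PySem.List.insertBy]
  | cons y ys ih =>
    intro hp
    rw [List.pairwise_cons] at hp
    obtain ⟨hy, hys⟩ := hp
    rw [insertBy_cons]
    by_cases h : pvBef x y = true
    · rw [if_pos h]
      have hxy : x.1 < y.1 := by simpa [pvBef] using h
      refine List.pairwise_cons.mpr ⟨?_, List.pairwise_cons.mpr ⟨hy, hys⟩⟩
      intro z hz
      rcases List.mem_cons.mp hz with rfl | hz
      · omega
      · have := hy z hz; omega
    · rw [if_neg h]
      have hxy : ¬ x.1 < y.1 := by simpa [pvBef] using h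
      refine List.pairwise_cons.mpr ⟨?_, ih hys⟩
      intro z hz
      rcases (PySem.List.mem_insertBy pvBef x z ys).mp hz with rfl | hz
      · omega
      · exact hy z hz

theorem insertBy_all_lt (x : Int × (Int × Int)) (l : List (Int × (Int × Int)))
    (h : ∀ z ∈ l, x.1 < z.1) : PySem.List.insertBy pvBef x l = x :: l := by
  cases l with
  | nil => rfl
  | cons z zs =>
    rw [insertBy_cons, if_pos (by simp [pvBef]; exact h z (by simp))]

theorem filter_insertBy (taken : List (Int × Int)) (maxd : Int) (x : Int × (Int × Int)) :
    ∀ (acc : List (Int × (Int × Int))), acc.Pairwise (fun a b => a.1 ≤ b.1) →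
      (PySem.List.insertBy pvBef x acc).filter (pvPP taken maxd) =
        if pvPP taken maxd x then PySem.List.insertBy pvBef x (acc.filter (pvPP taken maxd))
        else acc.filter (pvPP taken maxd) := by
  intro acc
  induction acc with
  | nil =>
    intro _
    by_cases hpx : pvPP taken maxd x = true
    · rw [if_pos hpx]; simp [PySem.List.insertBy, List.filter, hpx]
    · rw [if_neg hpx]; simp [PySem.List.insertBy, List.filter, Bool.eq_false_iff.mpr hpx]
  | cons y ys ih =>
    intro hp
    rw [List.pairwise_cons] at hp
    obtain ⟨hy, hys⟩ := hp
    rw [insertBy_cons]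
    by_cases h : pvBef x y = true
    · rw [if_pos h]
      have hxy : x.1 < y.1 := by simpa [pvBef] using h
      by_cases hpx : pvPP taken maxd x = true
      · rw [if_pos hpx]
        by_cases hpy : pvPP taken maxd y = true
        · rw [List.filter_cons_of_pos hpx, List.filter_cons_of_pos hpy, insertBy_cons, if_pos h]
        · rw [List.filter_cons_of_pos hpx,
            List.filter_cons_of_neg hpy]
          exact (insertBy_all_lt x _ (fun z hz => by
            have := hy z (List.mem_of_mem_filter hz); omega)).symm
      · rw [if_neg hpx, List.filter_cons_of_neg hpx]
    · rw [if_neg h]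
      have hxy : ¬ x.1 < y.1 := by simpa [pvBef] using h
      by_cases hpy : pvPP taken maxd y = true
      · by_cases hpx : pvPP taken maxd x = true
        · rw [if_pos hpx, List.filter_cons_of_pos hpy, ih hys, if_pos hpx,
            List.filter_cons_of_pos hpy, insertBy_cons, if_neg h]
        · rw [if_neg hpx, List.filter_cons_of_pos hpy, ih hys, if_neg hpx,
            List.filter_cons_of_pos hpy]
      · rw [List.filter_cons_of_neg hpy,
          List.filter_cons_of_neg hpy, ih hys]

theorem filter_foldl_insertBy (taken : List (Int × Int)) (maxd : Int) :
    ∀ (xs : List (Int × (Int × Int))) (acc : List (Int × (Int × Int))),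
      acc.Pairwise (fun a b => a.1 ≤ b.1) →
      (xs.foldl (fun a x => PySem.List.insertBy pvBef x a) acc).filter (pvPP taken maxd) =
        (xs.filter (pvPP taken maxd)).foldl (fun a x => PySem.List.insertBy pvBef x a)
          (acc.filter (pvPP taken maxd)) := by
  intro xs
  induction xs with
  | nil => intro acc _; rfl
  | cons x xs ih =>
    intro acc hp
    rw [List.foldl_cons, ih _ (pairwise_insertBy x acc hp), filter_insertBy taken maxd x acc hp]
    by_cases hpx : pvPP taken maxd x = true
    · rw [if_pos hpx, List.filter_cons_of_pos hpx, List.foldl_cons]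
    · rw [if_neg hpx, List.filter_cons_of_neg hpx]

theorem pickScanB_sorted (taken : List (Int × Int)) (maxd : Int) :
    ∀ (l : List (Int × (Int × Int))), l.Pairwise (fun a b => a.1 ≤ b.1) →
      pickScanB taken maxd l = ((l.filter (pvPP taken maxd)).head?).map Prod.snd := by
  intro l
  induction l with
  | nil => intro _; rfl
  | cons t rest ih =>
    intro hp
    rw [List.pairwise_cons] at hp
    obtain ⟨hall, hrest⟩ := hp
    obtain ⟨dist, cell⟩ := t
    by_cases hgt : dist > maxd
    · have h1 : pickScanB taken maxd ((dist, cell) :: rest) = none := by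
        simp [pickScanB, hgt]
      rw [h1, List.filter_cons_of_neg (by simp [pvPP]; omega),
        List.filter_eq_nil_iff.mpr (fun t ht => by
          have h2 := hall t ht
          simp only [pvPP, Bool.and_eq_true, decide_eq_true_eq, not_and]
          intro h3; exfalso; simp only at h2; omega)]
      rfl
    · by_cases hmem : cell ∈ taken
      · have h1 : pickScanB taken maxd ((dist, cell) :: rest) = pickScanB taken maxd rest := by
          simp [pickScanB, hgt, hmem]
        rw [h1, List.filter_cons_of_neg (by simp [pvPP, hmem]), ih hrest]
      · have h1 : pickScanB taken maxd ((dist, cell) :: rest) = some cell := by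
          simp [pickScanB, hgt, hmem]
        rw [h1, List.filter_cons_of_pos (by simp [pvPP, hmem]; omega)]
        rfl

def pvF (d : Int × Int) (c : Int × Int) : Int × (Int × Int) := (pvDist d c, c)
def pvG (d : Int × Int) (h : Option (Int × (Int × Int))) (c : Int × Int) : Option (Int × (Int × Int)) :=
  pvStep h (pvF d c)

theorem pvG_some (d m c : Int × Int) :
    pvG d (some (pvF d m)) c =
      some (if pvDist d c < pvDist d m then pvF d c else pvF d m) := by
  simp only [pvG, pvStep, pvF, pvBef, Option.elim_some]
  by_cases h : pvDist d c < pvDist d m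
  · rw [if_pos (by simpa using h), if_pos h]
  · rw [if_neg (by simpa using h), if_neg h]

theorem foldl_pvG_some (d : Int × Int) (taken : List (Int × Int)) (maxd : Int) :
    ∀ (cs : List (Int × Int)) (m : Int × Int),
      (cs.filter (pvQ d taken maxd)).foldl (pvG d) (some (pvF d m)) =
        some (pvF d ((pvFm d taken maxd cs).elim m
          (fun c => if pvDist d c < pvDist d m then c else m))) := by
  intro cs
  induction cs with
  | nil => intro m; rfl
  | cons c rest ih =>
    intro m
    by_cases hq : pvQ d taken maxd c = true
    · rw [List.filter_cons_of_pos hq, List.foldl_cons, pvG_some,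
        show pvFm d taken maxd (c :: rest) =
          some ((pvFm d taken maxd rest).elim c
            (fun m' => if pvDist d m' < pvDist d c then m' else c)) from by
          simp [pvFm, hq]]
      by_cases hlt : pvDist d c < pvDist d m
      · rw [if_pos hlt, ih c, Option.elim_some]
        rcases hfm : pvFm d taken maxd rest with _ | m' <;>
          simp only [Option.elim_none, Option.elim_some] <;>
          split_ifs <;> first | rfl | omega
      · rw [if_neg hlt, ih m, Option.elim_some]
        rcases hfm : pvFm d taken maxd rest with _ | m' <;>
          simp only [Option.elim_none, Option.elim_some] <;>
          split_ifs <;> first | rfl | omega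
    · rw [List.filter_cons_of_neg hq, ih m,
        show pvFm d taken maxd (c :: rest) = pvFm d taken maxd rest from by
          simp [pvFm, hq]]

theorem foldl_pvG_none (d : Int × Int) (taken : List (Int × Int)) (maxd : Int) :
    ∀ (cs : List (Int × Int)),
      (cs.filter (pvQ d taken maxd)).foldl (pvG d) none =
        (pvFm d taken maxd cs).map (pvF d) := by
  intro cs
  induction cs with
  | nil => rfl
  | cons c rest ih =>
    by_cases hq : pvQ d taken maxd c = true
    · rw [List.filter_cons_of_pos hq, List.foldl_cons,
        show pvG d none c = some (pvF d c) from rfl, foldl_pvG_some,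
        show pvFm d taken maxd (c :: rest) =
          some ((pvFm d taken maxd rest).elim c
            (fun m' => if pvDist d m' < pvDist d c then m' else c)) from by
          simp [pvFm, hq]]
      rfl
    · rw [List.filter_cons_of_neg hq, ih,
        show pvFm d taken maxd (c :: rest) = pvFm d taken maxd rest from by
          simp [pvFm, hq]]

theorem pick_alt_eq (d : Int × Int) (cs : List (Int × Int)) (taken : List (Int × Int)) (maxd : Int) :
    pick_spawn_cell_py_alt d cs taken maxd = pvFm d taken maxd cs := by
  have hpair : (PySem.List.sorted (cs.map (pvF d)) (fun t => t.1)).Pairwise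
      (fun a b : Int × (Int × Int) => a.1 ≤ b.1) := PySem.List.sorted_pairwise _ _
  have hsorted : PySem.List.sorted (cs.map (pvF d)) (fun t : Int × (Int × Int) => t.1) =
      (cs.map (pvF d)).foldl (fun a x => PySem.List.insertBy pvBef x a) [] :=
    PySem.List.sorted_eq_foldl_insertBy _ _
  have h1 : pick_spawn_cell_py_alt d cs taken maxd =
      ((PySem.List.sorted (cs.map (pvF d)) (fun t => t.1)).filter (pvPP taken maxd)).head?.map
        Prod.snd := pickScanB_sorted taken maxd _ hpair
  have h2 : (PySem.List.sorted (cs.map (pvF d)) (fun t => t.1)).filter (pvPP taken maxd) =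
      ((cs.map (pvF d)).filter (pvPP taken maxd)).foldl
        (fun a x => PySem.List.insertBy pvBef x a) [] := by
    rw [hsorted]
    exact filter_foldl_insertBy taken maxd _ [] List.Pairwise.nil
  have h3 : (((cs.map (pvF d)).filter (pvPP taken maxd)).foldl
        (fun a x => PySem.List.insertBy pvBef x a) ([] : List (Int × (Int × Int)))).head? =
      ((cs.map (pvF d)).filter (pvPP taken maxd)).foldl pvStep none :=
    head?_foldl_insertBy _ []
  have h4 : (cs.map (pvF d)).filter (pvPP taken maxd) =
      (cs.filter (pvQ d taken maxd)).map (pvF d) := by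
    rw [List.filter_map]; rfl
  have h5 : ((cs.filter (pvQ d taken maxd)).map (pvF d)).foldl pvStep none =
      (cs.filter (pvQ d taken maxd)).foldl (pvG d) none := by rw [List.foldl_map]; rfl
  rw [h1, h2, h3, h4, h5, foldl_pvG_none]
  rcases pvFm d taken maxd cs with _ | m <;> simp [pvF]

theorem pvFm_mem_q (d : Int × Int) (taken : List (Int × Int)) (maxd : Int) :
    ∀ (cs : List (Int × Int)) (m : Int × Int), pvFm d taken maxd cs = some m →
      m ∈ cs ∧ pvQ d taken maxd m = true := by
  intro cs
  induction cs with
  | nil => intro m h; cases h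
  | cons c rest ih =>
    intro m h
    rw [pvFm_cons] at h
    by_cases hq : pvQ d taken maxd c = true
    · rw [if_pos hq] at h
      rcases hfm : pvFm d taken maxd rest with _ | m'
      · rw [hfm, Option.elim_none] at h
        cases h; exact ⟨List.mem_cons_self, hq⟩
      · rw [hfm, Option.elim_some] at h
        have hm := Option.some.inj h
        by_cases hlt : pvDist d m' < pvDist d c
        · rw [if_pos hlt] at hm
          rcases hm with rfl
          exact ⟨List.mem_cons_of_mem c (ih _ hfm).1, (ih _ hfm).2⟩
        · rw [if_neg hlt] at hm
          rcases hm with rfl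
          exact ⟨List.mem_cons_self, hq⟩
    · rw [if_neg hq] at h
      obtain ⟨h1, h2⟩ := ih m h
      exact ⟨List.mem_cons_of_mem c h1, h2⟩

theorem pvFm_eq_none (d : Int × Int) (taken : List (Int × Int)) (maxd : Int) :
    ∀ (cs : List (Int × Int)), pvFm d taken maxd cs = none →
      ∀ c ∈ cs, pvQ d taken maxd c = false := by
  intro cs
  induction cs with
  | nil => intro _ c hc; cases hc
  | cons c rest ih =>
    intro h c' hc'
    rw [pvFm_cons] at h
    by_cases hq : pvQ d taken maxd c = true
    · rw [if_pos hq] at h; cases h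
    · rw [if_neg hq] at h
      rcases List.mem_cons.mp hc' with rfl | hc'
      · exact Bool.eq_false_iff.mpr hq
      · exact ih h c' hc'

theorem pvFm_isMin (d : Int × Int) (taken : List (Int × Int)) (maxd : Int) :
    ∀ (cs : List (Int × Int)) (m : Int × Int), pvFm d taken maxd cs = some m →
      ∀ c ∈ cs, pvQ d taken maxd c = true → pvDist d m ≤ pvDist d c := by
  intro cs
  induction cs with
  | nil => intro m h; cases h
  | cons c rest ih =>
    intro m h c' hc' hq'
    rw [pvFm_cons] at h
    by_cases hq : pvQ d taken maxd c = true
    · rw [if_pos hq] at h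
      rcases hfm : pvFm d taken maxd rest with _ | m'
      · rw [hfm, Option.elim_none] at h
        have hm := Option.some.inj h
        rw [← hm]
        rcases List.mem_cons.mp hc' with rfl | hc'
        · omega
        · rw [pvFm_eq_none d taken maxd rest hfm c' hc'] at hq'; cases hq'
      · rw [hfm, Option.elim_some] at h
        have hm := Option.some.inj h
        rw [← hm]
        rcases List.mem_cons.mp hc' with rfl | hc'
        · by_cases hlt : pvDist d m' < pvDist d c'
          · rw [if_pos hlt]; omega
          · rw [if_neg hlt]
        · have hmin := ih m' hfm c' hc' hq'
          by_cases hlt : pvDist d m' < pvDist d c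
          · rw [if_pos hlt]; omega
          · rw [if_neg hlt]; omega
    · rw [if_neg hq] at h
      rcases List.mem_cons.mp hc' with rfl | hc'
      · rw [hq'] at hq; cases hq rfl
      · exact ih m h c' hc' hq'

theorem pick_a_eq (d : Int × Int) (cs : List (Int × Int)) (taken : List (Int × Int)) (maxd : Int) :
    pick_spawn_cell_py d cs taken maxd =
      (pvFm d taken maxd cs).elim none
        (fun m => if pvDist d m < 1000000 then some m else none) := by
  rw [pick_spawn_cell_py, pickLoopA_eq]

theorem pvQ_iff (d : Int × Int) (taken : List (Int × Int)) (maxd : Int) (c : Int × Int) :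
    pvQ d taken maxd c = true ↔ (c ∉ taken ∧ pvDist d c ≤ maxd) := by
  simp [pvQ]; tauto

-- ===== VERDICT (by name: the statement is the Claim_ definition above) =====
theorem pick_spawn_cell_py_spec : Claim_unchanged_pick_spawn_cell_py := by
  intro d cs taken maxd _ hnD
  rw [pick_a_eq, pick_alt_eq]
  rcases hfm : pvFm d taken maxd cs with _ | m
  · rfl
  · rw [Option.elim_some]
    obtain ⟨hmem, hq⟩ := pvFm_mem_q d taken maxd cs m hfm
    obtain ⟨hnt, hle⟩ := (pvQ_iff d taken maxd m).mp hq
    by_cases hcap : pvDist d m < 1000000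
    · rw [if_pos hcap]
    · exfalso
      apply hnD
      refine ⟨⟨m, hmem, hnt, by rw [pvDist_eq]; exact hle⟩, ?_⟩
      intro c hc hcnt hcle
      rw [pvDist_eq] at hcle ⊢
      have := pvFm_isMin d taken maxd cs m hfm c hc ((pvQ_iff d taken maxd c).mpr ⟨hcnt, hcle⟩)
      omega

theorem pick_spawn_cell_py_changed : Claim_changed_pick_spawn_cell_py := by
  unfold Claim_changed_pick_spawn_cell_py; decide

theorem pick_spawn_cell_py_tight : Claim_exact_pick_spawn_cell_py := by
  intro d cs taken maxd _ hD
  obtain ⟨⟨c0, hc0, hc0nt, hc0le⟩, hall⟩ := hD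
  rw [pvDist_eq] at hc0le
  rw [pick_a_eq, pick_alt_eq]
  rcases hfm : pvFm d taken maxd cs with _ | m
  · have h1 := pvFm_eq_none d taken maxd cs hfm c0 hc0
    rw [(pvQ_iff d taken maxd c0).mpr ⟨hc0nt, hc0le⟩] at h1
    cases h1
  · rw [Option.elim_some]
    obtain ⟨hmem, hq⟩ := pvFm_mem_q d taken maxd cs m hfm
    obtain ⟨hnt, hle⟩ := (pvQ_iff d taken maxd m).mp hq
    have hcap := hall m hmem hnt (by rw [pvDist_eq]; exact hle)
    rw [pvDist_eq] at hcap
    rw [if_neg (by omega)]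
    simp
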